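-- pv_equiv track=rewrite | github.com/koii-network/prometheus-beta | src/number_utils.py | analyze_numbers
-- ===== SOURCE A (Python) =====
-- def analyze_numbers(numbers):
--     """
--     Analyze a list of numbers by summing even numbers and counting odd numbers.
--
--     Args:
--         numbers (list): A list of integers to analyze.
--
--     Returns:
--         tuple: A tuple containing two elements:
--             - Sum of all even numbers in the list
--             - Count of odd numbers in the list
--     """
--     # Validate input is a list
--     if not isinstance(numbers, list):
--         raise TypeError("Input must be a list of numbers")
--
--     # Validate list contains only numbers
--     if not all(isinstance(num, (int, float)) for num in numbers):
--         raise ValueError("List must contain only numbers")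
--
--     # Calculate sum of even numbers and count of odd numbers
--     even_sum = sum(num for num in numbers if num % 2 == 0)
--     odd_count = sum(1 for num in numbers if num % 2 != 0)
--
--     return even_sum, odd_count
-- ===== SOURCE B (Python) =====
-- def analyze_numbers(numbers):
--     """Branch-free arithmetic re-implementation.
--
--     Uses the identity: for an int n, p = n % 2 is 0 for even and 1 for odd,
--     so odd_count = sum of parities, and even_sum = total - sum(n * p)
--     (n * p keeps exactly the odd elements). No conditional filtering at all.
--     """
--     if not isinstance(numbers, list):
--         raise TypeError("Input must be a list of numbers")
--     if not all(isinstance(num, (int, float)) for num in numbers):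
--         raise ValueError("List must contain only numbers")
--     parities = [num % 2 for num in numbers]
--     odd_count = sum(parities)
--     even_sum = sum(numbers) - sum(n * p for n, p in zip(numbers, parities))
--     return even_sum, odd_count
-- ===== Notes on version B (the rewrite author's own statement) =====
-- stated objective: alternative
-- what changed: Replaced A's conditional filtering (two generator scans with 'if num % 2' tests) by a branch-free arithmetic formulation: parities p = n % 2 are materialised once, odd_count is their sum, and even_sum is total minus sum(n*p), using the identity that n*(n%2) keeps exactly the odd elements.
import Mathlib
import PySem

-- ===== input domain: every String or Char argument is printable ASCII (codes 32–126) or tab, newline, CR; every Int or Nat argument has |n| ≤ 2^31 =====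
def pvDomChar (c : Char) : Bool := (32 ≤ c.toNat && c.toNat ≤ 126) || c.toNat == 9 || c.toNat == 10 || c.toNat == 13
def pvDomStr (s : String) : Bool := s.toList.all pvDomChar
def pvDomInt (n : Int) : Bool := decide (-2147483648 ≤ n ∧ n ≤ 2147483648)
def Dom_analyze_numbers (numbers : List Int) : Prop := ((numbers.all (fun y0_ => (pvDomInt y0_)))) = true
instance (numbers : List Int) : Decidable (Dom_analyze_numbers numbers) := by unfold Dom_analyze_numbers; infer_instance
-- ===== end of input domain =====

-- B replaces A's conditional filtering by a branch-free arithmetic formulation via parities n % 2 (objective: alternative).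
-- ===== PORT A =====
-- even_sum = sum(num for num in numbers if num % 2 == 0); odd_count = sum(1 for num in numbers if num % 2 != 0)
def analyze_numbers (numbers : List Int) : Int × Int :=
  let even_sum := (numbers.filter (fun num => PySem.Int.mod num 2 == 0)).foldl (· + ·) 0
  let odd_count := ((numbers.filter (fun num => PySem.Int.mod num 2 != 0)).map (fun _ => (1 : Int))).foldl (· + ·) 0
  (even_sum, odd_count)

-- ===== PORT B =====
-- parities = [num % 2 for num in numbers]; odd_count = sum(parities);
-- even_sum = sum(numbers) - sum(n * p for n, p in zip(numbers, parities))
def analyze_numbers_alt (numbers : List Int) : Int × Int :=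
  let parities := numbers.map (fun num => PySem.Int.mod num 2)
  let odd_count := parities.foldl (· + ·) 0
  let even_sum := numbers.foldl (· + ·) 0
    - ((numbers.zip parities).map (fun np => np.1 * np.2)).foldl (· + ·) 0
  (even_sum, odd_count)

-- ===== PRECONDITION & SPEC =====
def Spec_analyze_numbers (numbers : List Int) (out : Int × Int) : Prop := out = analyze_numbers_alt numbers
instance (numbers : List Int) (out : Int × Int) : Decidable (Spec_analyze_numbers numbers out) := by unfold Spec_analyze_numbers; infer_instance

-- ===== CLAIM =====
def Claim_equal_analyze_numbers : Prop := ∀ (numbers : List Int), Dom_analyze_numbers numbers → Spec_analyze_numbers numbers (analyze_numbers numbers)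

-- ===== LEMMAS AND PROOFS =====
lemma sum_shift (l : List Int) (a : Int) :
    l.foldl (· + ·) a = a + l.foldl (· + ·) 0 := by
  induction l generalizing a with
  | nil => simp
  | cons x xs ih =>
    simp only [List.foldl_cons]
    rw [ih (a + x), ih (0 + x)]
    ring

-- Python's mod with positive divisor 2 is Lean's emod
lemma modtwo (n : Int) : PySem.Int.mod n 2 = n % 2 :=
  PySem.Int.mod_eq_emod_of_pos (b := 2) (a := n) (by omega)

-- B's even_sum numerator: Σ n·(n%2) equals the sum of the odd elements
lemma odd_prod_sum (numbers : List Int) :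
    ((numbers.zip (numbers.map (fun num => PySem.Int.mod num 2))).map
        (fun np => np.1 * np.2)).foldl (· + ·) 0
      = (numbers.filter (fun num => PySem.Int.mod num 2 != 0)).foldl (· + ·) 0 := by
  simp only [modtwo]
  induction numbers with
  | nil => simp
  | cons x xs ih =>
    rcases Int.emod_two_eq x with h | h
    · rw [List.filter_cons_of_neg (p := fun num => num % 2 != 0) (a := x) (by show ¬ ((x % 2 != 0) = true); simp only [h]; decide)]
      simp only [List.map_cons, List.zip_cons_cons, List.foldl_cons, h, mul_zero]
      simpa using ih
    · rw [List.filter_cons_of_pos (p := fun num => num % 2 != 0) (a := x) (by show (x % 2 != 0) = true; simp only [h]; decide)]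
      simp only [List.map_cons, List.zip_cons_cons, List.foldl_cons, h, mul_one]
      rw [sum_shift _ (0 + x), sum_shift _ (0 + x), ih]

-- B's odd_count: Σ (n%2) equals the number of odd elements
lemma parity_sum (numbers : List Int) :
    (numbers.map (fun num => PySem.Int.mod num 2)).foldl (· + ·) 0
      = ((numbers.filter (fun num => PySem.Int.mod num 2 != 0)).map
          (fun _ => (1 : Int))).foldl (· + ·) 0 := by
  simp only [modtwo]
  induction numbers with
  | nil => simp
  | cons x xs ih =>
    rcases Int.emod_two_eq x with h | h
    · rw [List.filter_cons_of_neg (p := fun num => num % 2 != 0) (a := x) (by show ¬ ((x % 2 != 0) = true); simp only [h]; decide)]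
      simp only [List.map_cons, List.foldl_cons, h]
      simpa using ih
    · rw [List.filter_cons_of_pos (p := fun num => num % 2 != 0) (a := x) (by show (x % 2 != 0) = true; simp only [h]; decide)]
      simp only [List.map_cons, List.foldl_cons, h]
      rw [sum_shift _ (0 + 1), sum_shift _ (0 + 1), ih]

-- total sum splits into even part plus odd part
lemma total_split (numbers : List Int) :
    numbers.foldl (· + ·) 0
      = (numbers.filter (fun num => PySem.Int.mod num 2 == 0)).foldl (· + ·) 0
        + (numbers.filter (fun num => PySem.Int.mod num 2 != 0)).foldl (· + ·) 0 := by
  simp only [modtwo]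
  induction numbers with
  | nil => simp
  | cons x xs ih =>
    rcases Int.emod_two_eq x with h | h
    · rw [List.filter_cons_of_pos (p := fun num => num % 2 == 0) (a := x) (by show (x % 2 == 0) = true; simp only [h]; decide),
         List.filter_cons_of_neg (p := fun num => num % 2 != 0) (a := x) (by show ¬ ((x % 2 != 0) = true); simp only [h]; decide)]
      simp only [List.foldl_cons]
      rw [sum_shift _ (0 + x), sum_shift _ (0 + x), ih]; ring
    · rw [List.filter_cons_of_neg (p := fun num => num % 2 == 0) (a := x) (by show ¬ ((x % 2 == 0) = true); simp only [h]; decide),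
         List.filter_cons_of_pos (p := fun num => num % 2 != 0) (a := x) (by show (x % 2 != 0) = true; simp only [h]; decide)]
      simp only [List.foldl_cons]
      rw [sum_shift _ (0 + x), sum_shift _ (0 + x), ih]; ring

-- ===== VERDICT =====
theorem analyze_numbers_spec : Claim_equal_analyze_numbers := by
  intro numbers _
  unfold Spec_analyze_numbers analyze_numbers analyze_numbers_alt
  simp only [Prod.mk.injEq]
  rw [odd_prod_sum, parity_sum]
  have h := total_split numbers
  constructor <;> omega
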